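-- pv_equiv track=rewrite | github.com/klknet/geeks4geeks | datastructure/array/misc.py | minimum_incr_operation
-- ===== SOURCE A (Python) =====
-- def minimum_incr_operation(arr, k):
--     """
--     Minimum increment by k operations to make all elements equal.
--     :param arr:
--     :param k:
--     :return:
--     """
--     m = max(arr)
--     t = 0
--     for i in arr:
--         if (m - i) % k == 0:
--             t += (m - i) // k
--         else:
--             return -1
--     return t
-- ===== SOURCE B (Python) =====
-- def minimum_incr_operation(arr, k):
--     m = max(arr)
--     r = m % k
--     if any(i % k != r for i in arr):
--         return -1
--     return (len(arr) * m - sum(arr)) // k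
-- ===== Notes on version B (the rewrite author's own statement) =====
-- stated objective: alternative
-- what changed: Replaces A's fused loop that divides each (max-i) by k and sums quotients (with early -1) by a residue-class feasibility test (i % k == max % k for all i) and a single closed-form aggregate (len(arr)*max - sum(arr)) // k, with no per-element division or subtraction-quotient accumulation.
import Mathlib
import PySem

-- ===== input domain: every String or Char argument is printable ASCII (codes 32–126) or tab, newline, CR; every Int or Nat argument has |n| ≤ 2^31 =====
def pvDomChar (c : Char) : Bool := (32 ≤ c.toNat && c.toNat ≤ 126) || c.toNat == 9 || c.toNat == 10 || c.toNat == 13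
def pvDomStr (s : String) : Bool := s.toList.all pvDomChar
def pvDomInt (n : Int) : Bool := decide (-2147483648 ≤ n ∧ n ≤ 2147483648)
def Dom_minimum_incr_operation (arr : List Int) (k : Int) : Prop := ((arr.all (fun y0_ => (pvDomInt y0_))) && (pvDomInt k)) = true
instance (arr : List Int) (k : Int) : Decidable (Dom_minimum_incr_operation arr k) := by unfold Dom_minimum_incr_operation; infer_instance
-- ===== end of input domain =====

-- B replaces A's fused quotient-summing loop by a residue-class feasibility check (i % k vs max % k) and a closed-form aggregate (len*max - sum)//k; same values everywhere A returns.


-- ===== PORT A =====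
def pvLoopA (m k : Int) (xs : List Int) (t : Int) : Int :=
  match xs with
  | [] => t
  | i :: rest =>
    if PySem.Int.mod (m - i) k = 0 then
      pvLoopA m k rest (t + PySem.Int.floordiv (m - i) k)
    else -1

-- max(arr) raises ValueError on []; Pre_ excludes that, the `none` branch is never reached inside Pre_.
def minimum_incr_operation (arr : List Int) (k : Int) : Int :=
  match PySem.List.max? arr (fun x => x) with
  | none => 0
  | some m => pvLoopA m k arr 0

-- ===== PORT B =====
-- max(arr) raises ValueError on []; Pre_ excludes that, the `none` branch is never reached inside Pre_.
def minimum_incr_operation_alt (arr : List Int) (k : Int) : Int :=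
  match PySem.List.max? arr (fun x => x) with
  | none => 0
  | some m =>
    let r := PySem.Int.mod m k
    if arr.any (fun i => PySem.Int.mod i k ≠ r) then -1
    else PySem.Int.floordiv ((arr.length : Int) * m - arr.sum) k

-- ===== PRECONDITION & SPEC =====
-- Pre_ excludes exactly the inputs on which A raises: empty arr (ValueError from max) and k = 0 (ZeroDivisionError).
def Pre_minimum_incr_operation (arr : List Int) (k : Int) : Prop := arr ≠ [] ∧ k ≠ 0
instance (arr : List Int) (k : Int) : Decidable (Pre_minimum_incr_operation arr k) := by unfold Pre_minimum_incr_operation; infer_instance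
def pvWitness_minimum_incr_operation : List Int × Int := ([1, 3, 5], 2)

def Spec_minimum_incr_operation (arr : List Int) (k : Int) (out : Int) : Prop := out = minimum_incr_operation_alt arr k
instance (arr : List Int) (k : Int) (out : Int) : Decidable (Spec_minimum_incr_operation arr k out) := by unfold Spec_minimum_incr_operation; infer_instance

-- ===== CLAIM (what is proved, stated in full; the proofs are below) =====
def Claim_equal_minimum_incr_operation : Prop := ∀ (arr : List Int) (k : Int), Dom_minimum_incr_operation arr k → Pre_minimum_incr_operation arr k → Spec_minimum_incr_operation arr k (minimum_incr_operation arr k)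

-- ===== LEMMAS AND PROOFS =====

-- A's loop, characterised: -1 if some diff is not divisible, else the sum of the quotients.
theorem pvLoopA_eq (m k : Int) (xs : List Int) (t : Int) :
    pvLoopA m k xs t =
      if xs.any (fun i => PySem.Int.mod (m - i) k ≠ 0) then -1
      else t + (xs.map (fun i => PySem.Int.floordiv (m - i) k)).sum := by
  induction xs generalizing t with
  | nil => simp [pvLoopA]
  | cons i rest ih =>
    simp only [pvLoopA, List.any_cons, List.map_cons, List.sum_cons]
    by_cases h : PySem.Int.mod (m - i) k = 0
    · simp [h, ih]; split_ifs <;> ring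
    · simp [h]

-- Same residue mod k ↔ the difference is divisible by k (k ≠ 0).
theorem mod_eq_iff_dvd_sub (k a b : Int) (hk : k ≠ 0) :
    PySem.Int.mod a k = PySem.Int.mod b k ↔ k ∣ (b - a) := by
  have ha := PySem.Int.floordiv_mul_add_mod a k
  have hb := PySem.Int.floordiv_mul_add_mod b k
  constructor
  · intro h
    exact ⟨PySem.Int.floordiv b k - PySem.Int.floordiv a k, by nlinarith⟩
  · rintro ⟨c, hc⟩
    have hdc : PySem.Int.mod b k - PySem.Int.mod a k =
        k * (c - PySem.Int.floordiv b k + PySem.Int.floordiv a k) := by nlinarith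
    rcases lt_or_gt_of_ne hk with hneg | hpos
    · have h1 := PySem.Int.mod_neg_bounds a hneg
      have h2 := PySem.Int.mod_neg_bounds b hneg
      set d := c - PySem.Int.floordiv b k + PySem.Int.floordiv a k with hd
      rcases lt_trichotomy d 0 with h | h | h
      · nlinarith
      · rw [h, mul_zero] at hdc; omega
      · nlinarith
    · have h1n := PySem.Int.mod_nonneg a hpos
      have h1l := PySem.Int.mod_lt a hpos
      have h2n := PySem.Int.mod_nonneg b hpos
      have h2l := PySem.Int.mod_lt b hpos
      set d := c - PySem.Int.floordiv b k + PySem.Int.floordiv a k with hd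
      rcases lt_trichotomy d 0 with h | h | h
      · nlinarith
      · rw [h, mul_zero] at hdc; omega
      · nlinarith

-- Exact division: if k ∣ d then floordiv d k * k = d.
theorem floordiv_mul_of_dvd (k d : Int) (h : k ∣ d) :
    PySem.Int.floordiv d k * k = d := by
  have := PySem.Int.floordiv_mul_add_mod d k
  have h0 : PySem.Int.mod d k = 0 := (PySem.Int.mod_eq_zero_iff_dvd d k).mpr h
  omega

-- When every diff is divisible, the summed quotients equal the quotient of the summed diffs.
theorem sum_floordiv_eq (k m : Int) (hk : k ≠ 0) (xs : List Int)
    (h : ∀ i ∈ xs, k ∣ (m - i)) :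
    (xs.map (fun i => PySem.Int.floordiv (m - i) k)).sum =
      PySem.Int.floordiv ((xs.length : Int) * m - xs.sum) k := by
  have hmul : (xs.map (fun i => PySem.Int.floordiv (m - i) k)).sum * k =
      (xs.length : Int) * m - xs.sum := by
    induction xs with
    | nil => simp
    | cons a l ih =>
      simp only [List.map_cons, List.sum_cons, List.length_cons]
      rw [add_mul, floordiv_mul_of_dvd k (m - a) (h a (by simp)),
        ih (fun i hi => h i (List.mem_cons_of_mem _ hi))]
      push_cast; ring
  have hdvd : k ∣ ((xs.length : Int) * m - xs.sum) :=
    ⟨(xs.map (fun i => PySem.Int.floordiv (m - i) k)).sum, by linarith⟩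
  have hmul2 := floordiv_mul_of_dvd k _ hdvd
  have := hmul.trans hmul2.symm
  exact mul_right_cancel₀ hk this

-- ===== VERDICT (by name: the statement is the Claim_ definition above) =====
theorem minimum_incr_operation_spec : Claim_equal_minimum_incr_operation := by
  intro arr k _ hpre
  unfold Spec_minimum_incr_operation minimum_incr_operation minimum_incr_operation_alt
  cases hmax : PySem.List.max? arr (fun x => x) with
  | none => rfl
  | some m =>
    have hk := hpre.2
    simp only [pvLoopA_eq]
    have hany : (arr.any (fun i => PySem.Int.mod (m - i) k ≠ 0)) =
        (arr.any (fun i => PySem.Int.mod i k ≠ PySem.Int.mod m k)) := by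
      refine List.any_congr rfl (fun i => ?_)
      simp only [ne_eq, decide_eq_decide, not_iff_not]
      rw [PySem.Int.mod_eq_zero_iff_dvd, mod_eq_iff_dvd_sub k i m hk]
    rw [hany]
    split_ifs with h
    · rfl
    · simp only [List.any_eq_true, not_exists, not_and] at h
      rw [zero_add]
      exact sum_floordiv_eq k m hk arr (fun i hi => by
        rw [← mod_eq_iff_dvd_sub k i m hk]
        simpa using h i hi)
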